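-- pv_equiv track=rewrite | github.com/abdulrehman1612/Mini-games | hangman/hangman.py | has_player_won
-- ===== SOURCE A (Python) =====
-- def has_player_won(secret_word, letters_guessed):
--     """
--     secret_word: string, the lowercase word the user is guessing
--     letters_guessed: list (of lowercase letters), the letters that have been
--         guessed so far
--
--     returns: boolean, True if all the letters of secret_word are in letters_guessed,
--         False otherwise
--     """
--     count = 0
--     for char in letters_guessed:
--         for ch in secret_word:
--             if char == ch:
--                 count+=1
--     if count == len(secret_word): #when all secret_word letters are counted in letters_guessed, player won as he guessed all of them
--         return True
--     else:
--         return False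
-- ===== SOURCE B (Python) =====
-- def has_player_won(secret_word, letters_guessed):
--     freq_secret = {}
--     for ch in secret_word:
--         freq_secret[ch] = freq_secret.get(ch, 0) + 1
--     freq_guessed = {}
--     for g in letters_guessed:
--         freq_guessed[g] = freq_guessed.get(g, 0) + 1
--     total = 0
--     for k, v in freq_guessed.items():
--         total += freq_secret.get(k, 0) * v
--     return total == len(secret_word)
-- ===== Notes on version B (the rewrite author's own statement) =====
-- stated objective: faster
-- what changed: Replaces A's nested per-guess scan of the secret by two frequency tables (dict counters of the secret's characters and of the guesses) whose dot product over the distinct guess keys gives the same total match count in one pass per collection.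
import Mathlib
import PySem

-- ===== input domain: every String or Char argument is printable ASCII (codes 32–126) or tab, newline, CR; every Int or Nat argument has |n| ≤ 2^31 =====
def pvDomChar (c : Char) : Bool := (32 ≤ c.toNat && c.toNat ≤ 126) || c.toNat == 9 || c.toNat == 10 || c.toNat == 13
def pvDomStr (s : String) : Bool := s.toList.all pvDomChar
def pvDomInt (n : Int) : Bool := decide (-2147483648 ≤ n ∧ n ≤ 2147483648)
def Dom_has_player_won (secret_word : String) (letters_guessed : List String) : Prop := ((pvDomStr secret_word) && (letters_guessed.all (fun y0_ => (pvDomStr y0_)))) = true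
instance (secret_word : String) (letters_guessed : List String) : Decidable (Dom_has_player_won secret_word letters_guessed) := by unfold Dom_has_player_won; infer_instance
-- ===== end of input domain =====

-- B replaces A's nested per-guess scan of the secret by two frequency dicts and a dot product over guess keys (alternative decomposition, same result).


-- ===== PORT A =====
-- count = 0; for char in letters_guessed: for ch in secret_word: if char == ch: count += 1
-- (iterating a Python str yields 1-character strings, hence the String.singleton comparison)
def has_player_won (secret_word : String) (letters_guessed : List String) : Bool :=
  let count : Int :=
    letters_guessed.foldl
      (fun cnt char =>
        secret_word.toList.foldl
          (fun c ch => if char == String.singleton ch then c + 1 else c) cnt)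
      0
  if count = (PySem.Str.len secret_word : Int) then true else false

-- ===== PORT B =====
-- two frequency dicts (secret characters as 1-char strings, guesses), then a dot product over the guess dict's items
def has_player_won_alt (secret_word : String) (letters_guessed : List String) : Bool :=
  let freq_secret : PySem.Dict String Int :=
    (secret_word.toList.map (fun ch => String.singleton ch)).foldl
      (fun d ch => d.insert ch (d.getD ch 0 + 1)) PySem.Dict.empty
  let freq_guessed : PySem.Dict String Int :=
    letters_guessed.foldl (fun d g => d.insert g (d.getD g 0 + 1)) PySem.Dict.empty
  let total : Int :=
    freq_guessed.items.foldl (fun t kv => t + freq_secret.getD kv.1 0 * kv.2) 0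
  total = (PySem.Str.len secret_word : Int)

-- ===== PRECONDITION & SPEC =====
def Spec_has_player_won (secret_word : String) (letters_guessed : List String) (out : Bool) : Prop := out = has_player_won_alt secret_word letters_guessed
instance (secret_word : String) (letters_guessed : List String) (out : Bool) : Decidable (Spec_has_player_won secret_word letters_guessed out) := by unfold Spec_has_player_won; infer_instance

-- ===== CLAIM (what is proved, stated in full; the proofs are below) =====
def Claim_equal_has_player_won : Prop := ∀ (secret_word : String) (letters_guessed : List String), Dom_has_player_won secret_word letters_guessed → Spec_has_player_won secret_word letters_guessed (has_player_won secret_word letters_guessed)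

-- ===== LEMMAS AND PROOFS =====

-- singling out one element of a nodup list in a sum of ite's
theorem pv_sum_map_ite_single {α : Type} [DecidableEq α] (d : List α) (f : α → Int) (g : α)
    (hnd : d.Nodup) (hg : g ∈ d) :
    (d.map (fun k => if k = g then f k else 0)).sum = f g := by
  induction d with
  | nil => cases hg
  | cons a t ih =>
    rcases List.nodup_cons.mp hnd with ⟨ha, hnt⟩
    rcases List.mem_cons.mp hg with hga | hg
    · subst hga
      simp only [List.map_cons, List.sum_cons]
      have hz : (t.map (fun k => if k = g then f k else 0)).sum = 0 := by
        rw [List.sum_eq_zero]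
        intro x hx
        rcases List.mem_map.mp hx with ⟨k, hk, rfl⟩
        have hkg : k ≠ g := fun h => ha (h ▸ hk)
        simp [hkg]
      simp [hz]
    · have hag : a ≠ g := fun h => ha (h ▸ hg)
      simp only [List.map_cons, List.sum_cons, if_neg hag, ih hnt hg, zero_add]

-- grouping a sum over a list by a nodup superset of its elements
theorem pv_sum_group {α : Type} [DecidableEq α] (l d : List α) (f : α → Int)
    (hnd : d.Nodup) (hsub : ∀ x ∈ l, x ∈ d) :
    (l.map f).sum = (d.map (fun k => f k * (l.count k : Int))).sum := by
  induction l with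
  | nil => simp
  | cons g t ih =>
    have hsub' : ∀ x ∈ t, x ∈ d := fun x hx => hsub x (List.mem_cons_of_mem _ hx)
    have hg : g ∈ d := hsub g (List.mem_cons_self)
    simp only [List.map_cons, List.sum_cons, ih hsub']
    have hrw : (d.map (fun k => f k * ((g :: t).count k : Int))).sum
        = (d.map (fun k => f k * (t.count k : Int) + (if k = g then f k else 0))).sum := by
      congr 1
      apply List.map_congr_left
      intro k _
      by_cases h : k = g
      · subst h; simp [mul_add]
      · have hgk : ¬ g = k := fun hh => h hh.symm
        simp [h, hgk]
    rw [hrw, List.sum_map_add, pv_sum_map_ite_single d f g hnd hg]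
    ring

-- ===== VERDICT (by name: the statement is the Claim_ definition above) =====
theorem has_player_won_spec : Claim_equal_has_player_won := by
  intro secret_word letters_guessed _
  unfold Spec_has_player_won has_player_won has_player_won_alt
  dsimp only
  set S : List String := secret_word.toList.map (fun ch => String.singleton ch) with hS
  have hinner : ∀ (char : String) (cnt : Int),
      secret_word.toList.foldl (fun c ch => if char == String.singleton ch then c + 1 else c) cnt
        = cnt + (S.count char : Int) := by
    intro char cnt
    rw [PySem.List.foldl_if_add_one (p := fun ch => char == String.singleton ch)]
    congr 1
    rw [hS, Int.natCast_inj, List.count_eq_countP, List.countP_map]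
    apply List.countP_congr
    intro ch _
    simp only [Function.comp_apply]
    rw [BEq.comm]
  have hA : letters_guessed.foldl
      (fun cnt char => secret_word.toList.foldl
        (fun c ch => if char == String.singleton ch then c + 1 else c) cnt) 0
      = (letters_guessed.map (fun g => (S.count g : Int))).sum := by
    rw [PySem.List.foldl_congr_mem (l := letters_guessed) (init := (0 : Int))
      (f := fun cnt char => secret_word.toList.foldl
        (fun c ch => if char == String.singleton ch then c + 1 else c) cnt)
      (g := fun cnt char => cnt + (S.count char : Int))
      (by intro acc x _; exact hinner x acc)]
    rw [PySem.List.foldl_add]; simp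
  rw [hA]
  rw [PySem.Dict.foldl_insert_getD_add_one_eq_counter, PySem.Dict.foldl_insert_getD_add_one_eq_counter]
  rw [PySem.Dict.items_counter]
  have hB : ((PySem.Set.ofList letters_guessed).map
        (fun k => (k, (letters_guessed.count k : Int)))).foldl
        (fun t kv => t + (PySem.Dict.counter S).getD kv.1 0 * kv.2) 0
      = ((PySem.Set.ofList letters_guessed).map
        (fun k => (S.count k : Int) * (letters_guessed.count k : Int))).sum := by
    rw [PySem.List.foldl_add
      (l := (PySem.Set.ofList letters_guessed).map
        (fun k => (k, (letters_guessed.count k : Int)))) (a := 0)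
      (g := fun kv : String × Int => (PySem.Dict.counter S).getD kv.1 0 * kv.2)]
    simp [List.map_map, Function.comp_def, PySem.Dict.getD_counter]
  rw [hB]
  have hgrp := pv_sum_group letters_guessed (PySem.List.dedup letters_guessed)
      (fun g => (S.count g : Int)) (PySem.List.nodup_dedup _)
      (fun x hx => (PySem.List.mem_dedup _ _).mpr hx)
  simp only [PySem.List.dedup_eq_ofList] at hgrp
  rw [hgrp]
  split_ifs with h
  · exact (decide_eq_true h).symm
  · exact (decide_eq_false h).symm
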